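-- pv_equiv track=rewrite | github.com/MrBrantCode/unitest_baseline | mut_generate/mist_train_taco/taco_6093/solution.py | check_bridge_status
-- ===== SOURCE A (Python) =====
-- def check_bridge_status(n, passers):
--     class Sch:
--         def __init__(self, m, t):
--             self.m = m
--             self.t = t
--
--         def __lt__(self, other):
--             if self.t == other.t:
--                 return self.m < other.m
--             else:
--                 return self.t < other.t
--
--     schedule = []
--     for m, a, b in passers:
--         schedule.append(Sch(m, a))
--         schedule.append(Sch(-m, b))
--
--     schedule.sort()
--
--     M = 0
--     ans = 'OK'
--     for i in range(len(schedule)):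
--         M = M + schedule[i].m
--         if M > 150:
--             ans = 'NG'
--             break
--
--     return ans
-- ===== SOURCE B (Python) =====
-- def check_bridge_status(n, passers):
--     times = [a for _, a, _ in passers] + [b for _, _, b in passers]
--     for t in times:
--         load = sum(m for m, a, _ in passers if a <= t) - sum(m for m, _, b in passers if b <= t)
--         if load > 150:
--             return 'NG'
--     return 'OK'
-- ===== Notes on version B (the rewrite author's own statement) =====
-- stated objective: alternative
-- what changed: Instead of building and sorting a list of signed events and sweeping a running mass with a break, B checks each event time directly: for every entry/exit time t it computes the load (sum of masses of passers that entered by t minus those that exited by t) and answers NG if any such load exceeds 150 - no sorting, no event objects, no running accumulator.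
import Mathlib
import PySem

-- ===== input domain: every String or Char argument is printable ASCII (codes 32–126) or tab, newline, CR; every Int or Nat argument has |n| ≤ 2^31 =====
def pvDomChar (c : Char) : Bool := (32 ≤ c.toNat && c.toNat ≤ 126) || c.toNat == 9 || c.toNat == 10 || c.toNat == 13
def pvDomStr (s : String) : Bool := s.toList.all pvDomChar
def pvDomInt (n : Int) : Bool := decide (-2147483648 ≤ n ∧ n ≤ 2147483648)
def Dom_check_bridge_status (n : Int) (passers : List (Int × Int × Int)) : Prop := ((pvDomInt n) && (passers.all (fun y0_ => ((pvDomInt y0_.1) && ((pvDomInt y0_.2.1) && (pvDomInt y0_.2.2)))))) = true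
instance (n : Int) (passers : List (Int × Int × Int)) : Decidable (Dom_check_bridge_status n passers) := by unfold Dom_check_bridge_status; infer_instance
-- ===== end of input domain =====

-- B replaces A's sort-events-and-sweep with a direct per-event-time load check (no sorting); objective: alternative algorithm of similar cost.


-- ===== PORT A =====
-- the 'for i in range(len(schedule)): M += …; if M > 150: ans = 'NG'; break' loop (index loop with break)
def pvSweepA : List (Int × Int) → Int → String
  | [], _ => "OK"
  | s :: rest, M => if 150 < M + s.1 then "NG" else pvSweepA rest (M + s.1)

-- Sch objects are (m, t) pairs; Sch.__lt__ is lexicographic on (t, m), so schedule.sort() is sorted2 with keys (t, m)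
def check_bridge_status (n : Int) (passers : List (Int × Int × Int)) : String :=
  let schedule := passers.foldl (fun acc p => (acc ++ [(p.1, p.2.1)]) ++ [(-p.1, p.2.2)]) ([] : List (Int × Int))
  let schedule := PySem.List.sorted2 schedule (fun s => s.2) (fun s => s.1)
  pvSweepA schedule 0

-- ===== PORT B =====
def pvLoadAt (passers : List (Int × Int × Int)) (t : Int) : Int :=
  ((passers.filter (fun p => decide (p.2.1 ≤ t))).map (fun p => p.1)).sum
    - ((passers.filter (fun p => decide (p.2.2 ≤ t))).map (fun p => p.1)).sum

-- the 'for t in times: … return 'NG'' loop (early return)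
def pvSweepB (passers : List (Int × Int × Int)) : List Int → String
  | [] => "OK"
  | t :: ts => if 150 < pvLoadAt passers t then "NG" else pvSweepB passers ts

def check_bridge_status_alt (n : Int) (passers : List (Int × Int × Int)) : String :=
  pvSweepB passers (passers.map (fun p => p.2.1) ++ passers.map (fun p => p.2.2))

-- ===== PRECONDITION & SPEC =====
def Spec_check_bridge_status (n : Int) (passers : List (Int × Int × Int)) (out : String) : Prop := out = check_bridge_status_alt n passers
instance (n : Int) (passers : List (Int × Int × Int)) (out : String) : Decidable (Spec_check_bridge_status n passers out) := by unfold Spec_check_bridge_status; infer_instance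

-- ===== CLAIM (what is proved, stated in full; the proofs are below) =====
def Claim_equal_check_bridge_status : Prop := ∀ (n : Int) (passers : List (Int × Int × Int)), Dom_check_bridge_status n passers → Spec_check_bridge_status n passers (check_bridge_status n passers)

-- ===== LEMMAS AND PROOFS =====

-- the comparison Sch.__lt__ implements, as sorted2 instantiates it
def pvBlex (a b : Int × Int) : Bool :=
  decide (a.2 < b.2) || (!decide (b.2 < a.2) && decide (a.1 < b.1))

-- weak lexicographic order on (m, t) pairs by (t, m)
def pvRlex (a b : Int × Int) : Prop := a.2 < b.2 ∨ (a.2 = b.2 ∧ a.1 ≤ b.1)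

-- sum of the masses of the events of ss with time ≤ t
def pvS (ss : List (Int × Int)) (t : Int) : Int :=
  ((ss.filter (fun s => decide (s.2 ≤ t))).map (fun s => s.1)).sum

theorem pvBlex_false_iff (a b : Int × Int) : pvBlex a b = false ↔ pvRlex b a := by
  simp [pvBlex, pvRlex]; omega

theorem pvRlex_trans {a b c : Int × Int} (h1 : pvRlex a b) (h2 : pvRlex b c) : pvRlex a c := by
  simp only [pvRlex] at *; omega

theorem pvInsertBy_pairwise (x : Int × Int) (ys : List (Int × Int)) (h : ys.Pairwise pvRlex) :
    (PySem.List.insertBy pvBlex x ys).Pairwise pvRlex := by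
  induction ys with
  | nil => simp [PySem.List.insertBy]
  | cons y ys ih =>
    rw [List.pairwise_cons] at h
    by_cases hb : pvBlex x y = true
    · have hxy : pvRlex x y := by
        simp [pvBlex, pvRlex] at *; omega
      simp only [PySem.List.insertBy, hb, if_true]
      refine List.Pairwise.cons ?_ (List.Pairwise.cons h.1 h.2)
      intro z hz
      rcases List.mem_cons.mp hz with rfl | hz
      · exact hxy
      · exact pvRlex_trans hxy (h.1 z hz)
    · have hyx : pvRlex y x := (pvBlex_false_iff x y).mp (by simpa using hb)
      simp only [PySem.List.insertBy, hb]
      refine List.Pairwise.cons ?_ (ih h.2)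
      intro z hz
      rcases (PySem.List.mem_insertBy _ _ _ _).mp hz with rfl | hz
      · exact hyx
      · exact h.1 z hz

theorem pvFoldl_insertBy_pairwise (ss : List (Int × Int)) :
    ∀ acc : List (Int × Int), acc.Pairwise pvRlex →
      (ss.foldl (fun acc x => PySem.List.insertBy pvBlex x acc) acc).Pairwise pvRlex := by
  induction ss with
  | nil => intro acc h; simpa using h
  | cons s ss ih => intro acc h; exact ih _ (pvInsertBy_pairwise s acc h)

theorem pvSorted2_eq (ss : List (Int × Int)) :
    PySem.List.sorted2 ss (fun s => s.2) (fun s => s.1) =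
      ss.foldl (fun acc x => PySem.List.insertBy pvBlex x acc) [] := rfl

theorem pvSorted2_pairwise (ss : List (Int × Int)) :
    (PySem.List.sorted2 ss (fun s => s.2) (fun s => s.1)).Pairwise pvRlex := by
  rw [pvSorted2_eq]
  exact pvFoldl_insertBy_pairwise ss [] (List.Pairwise.nil)

theorem pvSched_eq (passers : List (Int × Int × Int)) :
    passers.foldl (fun acc p => (acc ++ [(p.1, p.2.1)]) ++ [(-p.1, p.2.2)]) ([] : List (Int × Int)) =
      passers.flatMap (fun p => [(p.1, p.2.1), (-p.1, p.2.2)]) := by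
  have h : ∀ (l : List (Int × Int × Int)) (acc : List (Int × Int)),
      l.foldl (fun acc p => (acc ++ [(p.1, p.2.1)]) ++ [(-p.1, p.2.2)]) acc =
        acc ++ l.flatMap (fun p => [(p.1, p.2.1), (-p.1, p.2.2)]) := by
    intro l
    induction l with
    | nil => intro acc; simp
    | cons q qs ihq => intro acc; rw [List.foldl_cons, ihq]; simp
  simpa using h passers []

theorem pvS_perm {l1 l2 : List (Int × Int)} (h : l1.Perm l2) (t : Int) : pvS l1 t = pvS l2 t :=
  List.Perm.sum_eq (List.Perm.map _ (List.Perm.filter _ h))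

theorem pvS_append (l1 l2 : List (Int × Int)) (t : Int) : pvS (l1 ++ l2) t = pvS l1 t + pvS l2 t := by
  simp [pvS]

theorem pvS_flatMap (passers : List (Int × Int × Int)) (t : Int) :
    pvS (passers.flatMap (fun p => [(p.1, p.2.1), (-p.1, p.2.2)])) t = pvLoadAt passers t := by
  induction passers with
  | nil => simp [pvS, pvLoadAt]
  | cons p ps ih =>
    simp only [List.flatMap_cons, pvS_append, ih]
    simp only [pvS, pvLoadAt, List.filter_cons, List.filter_nil]
    by_cases h1 : p.2.1 ≤ t <;> by_cases h2 : p.2.2 ≤ t <;>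
      simp [h1, h2] <;> ring

-- forward: if the sorted sweep reports NG, some event time has load > 150
theorem pvSweepA_ng (ss : List (Int × Int)) (hp : ss.Pairwise pvRlex) :
    ∀ M : Int, M ≤ 150 → pvSweepA ss M = "NG" → ∃ s ∈ ss, 150 < M + pvS ss s.2 := by
  induction ss with
  | nil => intro M _ h; simp [pvSweepA] at h
  | cons s rest ih =>
    rw [List.pairwise_cons] at hp
    intro M hM h
    by_cases hc : 150 < M + s.1
    · refine ⟨s, List.mem_cons_self, ?_⟩
      have hs1 : 0 < s.1 := by omega
      have hfilter : 0 ≤ pvS rest s.2 := by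
        refine List.sum_nonneg ?_
        intro v hv
        rcases List.mem_map.mp hv with ⟨y, hy, rfl⟩
        have hy' := List.mem_filter.mp hy
        have hr := hp.1 y hy'.1
        have hle : y.2 ≤ s.2 := by simpa using hy'.2
        rcases hr with hlt | ⟨_, hm⟩
        · omega
        · omega
      have : pvS (s :: rest) s.2 = s.1 + pvS rest s.2 := by
        simp [pvS]
      omega
    · have hM' : M + s.1 ≤ 150 := by omega
      have h' : pvSweepA rest (M + s.1) = "NG" := by
        simpa [pvSweepA, hc] using h
      rcases ih hp.2 (M + s.1) hM' h' with ⟨s', hs', hgt⟩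
      refine ⟨s', List.mem_cons_of_mem s hs', ?_⟩
      have hsle : s.2 ≤ s'.2 := by
        rcases hp.1 s' hs' with hlt | ⟨heq, _⟩ <;> omega
      have : pvS (s :: rest) s'.2 = s.1 + pvS rest s'.2 := by
        simp [pvS, hsle]
      omega

-- backward: if some time has load > 150, the sorted sweep reports NG
theorem pvSweepA_of_load (ss : List (Int × Int)) (hp : ss.Pairwise pvRlex) :
    ∀ M : Int, M ≤ 150 → ∀ t : Int, 150 < M + pvS ss t → pvSweepA ss M = "NG" := by
  induction ss with
  | nil => intro M hM t h; simp [pvS] at h; omega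
  | cons s rest ih =>
    rw [List.pairwise_cons] at hp
    intro M hM t h
    by_cases hc : 150 < M + s.1
    · simp [pvSweepA, hc]
    · have hM' : M + s.1 ≤ 150 := by omega
      simp only [pvSweepA, hc, if_false]
      by_cases hst : s.2 ≤ t
      · have hS : pvS (s :: rest) t = s.1 + pvS rest t := by
          simp [pvS, hst]
        exact ih hp.2 (M + s.1) hM' t (by omega)
      · exfalso
        have hS : pvS (s :: rest) t = 0 := by
          have hnil : (s :: rest).filter (fun x => decide (x.2 ≤ t)) = [] := by
            rw [List.filter_eq_nil_iff]
            intro y hy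
            rcases List.mem_cons.mp hy with rfl | hy
            · simpa using hst
            · have := hp.1 y hy
              have : s.2 ≤ y.2 := by rcases this with h1 | ⟨h1, _⟩ <;> omega
              simp; omega
          simp [pvS, hnil]
        omega

theorem pvSweepA_cases (ss : List (Int × Int)) (M : Int) :
    pvSweepA ss M = "NG" ∨ pvSweepA ss M = "OK" := by
  induction ss generalizing M with
  | nil => right; rfl
  | cons s rest ih =>
    by_cases hc : 150 < M + s.1
    · left; simp [pvSweepA, hc]
    · simpa [pvSweepA, hc] using ih (M + s.1)

theorem pvSweepB_eq (passers : List (Int × Int × Int)) (ts : List Int) :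
    pvSweepB passers ts =
      if ts.any (fun t => decide (150 < pvLoadAt passers t)) then "NG" else "OK" := by
  induction ts with
  | nil => rfl
  | cons t ts ih =>
    by_cases h : 150 < pvLoadAt passers t <;> simp [pvSweepB, h, ih]

-- ===== VERDICT (by name: the statement is the Claim_ definition above) =====
theorem check_bridge_status_spec : Claim_equal_check_bridge_status := by
  intro n passers _
  show check_bridge_status n passers = check_bridge_status_alt n passers
  unfold check_bridge_status check_bridge_status_alt
  rw [pvSched_eq, pvSweepB_eq]
  set sched := passers.flatMap (fun p => [(p.1, p.2.1), (-p.1, p.2.2)]) with hsched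
  set ss := PySem.List.sorted2 sched (fun s => s.2) (fun s => s.1) with hss
  have hperm : ss.Perm sched := PySem.List.sorted2_perm sched _ _ _
  have hp : ss.Pairwise pvRlex := pvSorted2_pairwise sched
  have hload : ∀ t, pvS ss t = pvLoadAt passers t := fun t =>
    (pvS_perm hperm t).trans (pvS_flatMap passers t)
  by_cases hany : (passers.map (fun p => p.2.1) ++ passers.map (fun p => p.2.2)).any
      (fun t => decide (150 < pvLoadAt passers t)) = true
  · rw [if_pos hany]
    rcases List.any_eq_true.mp hany with ⟨t, _, hgt⟩
    have hgt' : 150 < pvLoadAt passers t := by simpa using hgt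
    exact pvSweepA_of_load ss hp 0 (by omega) t (by rw [hload]; omega)
  · rw [if_neg hany]
    rcases pvSweepA_cases ss 0 with hng | hok
    · exfalso
      rcases pvSweepA_ng ss hp 0 (by omega) hng with ⟨s, hsmem, hgt⟩
      have hsmem' : s ∈ sched := hperm.mem_iff.mp hsmem
      rcases List.mem_flatMap.mp hsmem' with ⟨p, hpmem, hsin⟩
      have htmem : s.2 ∈ passers.map (fun p => p.2.1) ++ passers.map (fun p => p.2.2) := by
        rcases List.mem_cons.mp hsin with rfl | hsin
        · exact List.mem_append_left _ (List.mem_map.mpr ⟨p, hpmem, rfl⟩)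
        · rcases List.mem_cons.mp hsin with rfl | h
          · exact List.mem_append_right _ (List.mem_map.mpr ⟨p, hpmem, rfl⟩)
          · simp at h
      apply hany
      refine List.any_eq_true.mpr ⟨s.2, htmem, ?_⟩
      rw [hload] at hgt
      simpa using hgt
    · exact hok
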